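-- pv_equiv track=rewrite | github.com/TyrionLRB/PromptEng4ReqVal | nlp_prompt_experiment.py | mask_sentence
-- ===== SOURCE A (Python) =====
-- def mask_sentence(words_lst, word_pos_tags, mask_pos_list):
--     masked_sentences = []
--     check_used = []
--     loopings = word_pos_tags.count(mask_pos_list[0])
--     i = 0
--     while i < loopings:
--         masked_words = []
--         flg = ""
--         for word, pos in zip(words_lst, word_pos_tags):
--             if pos in mask_pos_list and word not in check_used and flg != "x":
--                 masked_words.append('[MASK]')
--                 check_used.append(word)
--                 flg = "x"
--             else:
--                 masked_words.append(word)
--         i += 1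
--         masked_sentences.append(' '.join(masked_words))
--     return masked_sentences
-- ===== SOURCE B (Python) =====
-- def mask_sentence(words_lst, word_pos_tags, mask_pos_list):
--     loopings = word_pos_tags.count(mask_pos_list[0])
--     pairs = list(zip(words_lst, word_pos_tags))
--     base = [w for w, _ in pairs]
--     positions = []
--     seen = set()
--     for idx, (word, pos) in enumerate(pairs):
--         if pos in mask_pos_list and word not in seen:
--             positions.append(idx)
--             seen.add(word)
--     out = []
--     for i in range(loopings):
--         if i < len(positions):
--             masked = list(base)
--             masked[positions[i]] = '[MASK]'
--             out.append(' '.join(masked))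
--         else:
--             out.append(' '.join(base))
--     return out
-- ===== Notes on version B (the rewrite author's own statement) =====
-- stated objective: faster
-- what changed: Replaces A's repeated full rescans of the sentence (one scan per output sentence, each re-checking the growing check_used list) by a single indexing pass that records the first position of each distinct maskable word, then generates each sentence directly by setting one index in a shared base list.
-- outside the precondition, e.g. on mask_sentence(['a'], ['N'], []): A raises IndexError, B raises IndexError
import Mathlib
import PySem

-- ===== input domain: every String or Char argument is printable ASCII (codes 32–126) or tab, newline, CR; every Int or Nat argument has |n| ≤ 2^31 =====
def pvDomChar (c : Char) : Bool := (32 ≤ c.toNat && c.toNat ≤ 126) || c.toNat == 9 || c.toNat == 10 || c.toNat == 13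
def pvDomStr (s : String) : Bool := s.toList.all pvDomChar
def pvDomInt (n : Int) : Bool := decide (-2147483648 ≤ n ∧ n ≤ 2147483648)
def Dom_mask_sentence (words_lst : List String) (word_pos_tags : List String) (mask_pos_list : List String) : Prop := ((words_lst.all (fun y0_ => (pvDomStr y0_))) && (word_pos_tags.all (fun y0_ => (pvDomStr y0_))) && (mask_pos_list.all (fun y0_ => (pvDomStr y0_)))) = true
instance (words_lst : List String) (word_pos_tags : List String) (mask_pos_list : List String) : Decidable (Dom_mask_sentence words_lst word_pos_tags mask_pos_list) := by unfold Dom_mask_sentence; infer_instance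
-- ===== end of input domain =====

-- B replaces A's per-sentence rescans (with a growing used-list) by one indexing pass plus direct generation; objective: faster (constant-factor).


-- ===== PORT A =====
-- the inner 'for word, pos in zip(...)' loop: state (masked_words being built, check_used, flg)
def aScan (mask : List String) : List (String × String) → List String → String → List String × List String
  | [], used, _ => ([], used)
  | (w, p) :: rest, used, flg =>
    if mask.contains p && !used.contains w && flg != "x" then
      let r := aScan mask rest (used ++ [w]) "x"
      ("[MASK]" :: r.1, r.2)
    else
      let r := aScan mask rest used flg
      (w :: r.1, r.2)

-- the outer 'while i < loopings' loop: each round appends one joined sentence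
def aLoop (mask : List String) (pairs : List (String × String)) : Nat → List String → List String
  | 0, _ => []
  | k + 1, used =>
    let r := aScan mask pairs used ""
    PySem.Str.join " " r.1 :: aLoop mask pairs k r.2

def mask_sentence (words_lst : List String) (word_pos_tags : List String) (mask_pos_list : List String) : List String :=
  let loopings := PySem.List.count word_pos_tags (PySem.List.pyGetD mask_pos_list 0 "")
  aLoop mask_pos_list (List.zip words_lst word_pos_tags) loopings []

-- ===== PORT B =====
-- single indexing pass: first index of each distinct word whose pos is maskable
def bScan (mask : List String) : List (String × String) → PySem.Set String → Nat → List Nat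
  | [], _, _ => []
  | (w, p) :: rest, seen, idx =>
    if mask.contains p && !(PySem.Set.contains seen w) then
      idx :: bScan mask rest (PySem.Set.add seen w) (idx + 1)
    else
      bScan mask rest seen (idx + 1)

def mask_sentence_alt (words_lst : List String) (word_pos_tags : List String) (mask_pos_list : List String) : List String :=
  let loopings := PySem.List.count word_pos_tags (PySem.List.pyGetD mask_pos_list 0 "")
  let pairs := List.zip words_lst word_pos_tags
  let base := pairs.map Prod.fst
  let positions := bScan mask_pos_list pairs PySem.Set.empty 0
  (List.range loopings).map (fun i =>
    if h : i < positions.length then PySem.Str.join " " (base.set positions[i] "[MASK]")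
    else PySem.Str.join " " base)

-- ===== PRECONDITION & SPEC =====
-- Pre_ excludes only an empty mask_pos_list, on which A raises IndexError (mask_pos_list[0]).
def Pre_mask_sentence (words_lst : List String) (word_pos_tags : List String) (mask_pos_list : List String) : Prop := mask_pos_list ≠ []
instance (words_lst : List String) (word_pos_tags : List String) (mask_pos_list : List String) : Decidable (Pre_mask_sentence words_lst word_pos_tags mask_pos_list) := by unfold Pre_mask_sentence; infer_instance
def pvWitness_mask_sentence : List String × List String × List String := (["the", "cat", "sat"], ["DT", "NN", "VB"], ["NN", "VB"])
def Spec_mask_sentence (words_lst : List String) (word_pos_tags : List String) (mask_pos_list : List String) (out : List String) : Prop := out = mask_sentence_alt words_lst word_pos_tags mask_pos_list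
instance (words_lst : List String) (word_pos_tags : List String) (mask_pos_list : List String) (out : List String) : Decidable (Spec_mask_sentence words_lst word_pos_tags mask_pos_list out) := by unfold Spec_mask_sentence; infer_instance

-- ===== CLAIM (what is proved, stated in full; the proofs are below) =====
def Claim_equal_mask_sentence : Prop := ∀ (words_lst : List String) (word_pos_tags : List String) (mask_pos_list : List String), Dom_mask_sentence words_lst word_pos_tags mask_pos_list → Pre_mask_sentence words_lst word_pos_tags mask_pos_list → Spec_mask_sentence words_lst word_pos_tags mask_pos_list (mask_sentence words_lst word_pos_tags mask_pos_list)

-- ===== LEMMAS AND PROOFS =====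

-- once flg = "x", the inner loop copies the rest verbatim and used is unchanged
lemma aScan_flg (mask : List String) : ∀ (pairs : List (String × String)) (used : List String),
    aScan mask pairs used "x" = (pairs.map Prod.fst, used) := by
  intro pairs
  induction pairs with
  | nil => intro used; rfl
  | cons hd tl ih =>
    intro used
    obtain ⟨w, p⟩ := hd
    simp [aScan, ih]

-- one inner-loop pass agrees with the head of the position list computed by bScan
lemma step (mask : List String) : ∀ (pairs : List (String × String)) (used : List String) (n : Nat),
    (bScan mask pairs used n = [] → aScan mask pairs used "" = (pairs.map Prod.fst, used)) ∧
    (∀ q t, bScan mask pairs used n = q :: t →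
      n ≤ q ∧ ∃ w, aScan mask pairs used "" = ((pairs.map Prod.fst).set (q - n) "[MASK]", used ++ [w]) ∧
        bScan mask pairs (used ++ [w]) n = t) := by
  intro pairs
  induction pairs with
  | nil =>
    intro used n
    exact ⟨fun _ => rfl, fun q t h => by simp [bScan] at h⟩
  | cons hd tl ih =>
    intro used n
    obtain ⟨w, p⟩ := hd
    by_cases hm : p ∈ mask
    · by_cases hu : w ∈ used
      · -- word already used: both scans skip this pair
        have hb : bScan mask ((w, p) :: tl) used n = bScan mask tl used (n + 1) := by
          simp [bScan, PySem.Set.contains, hu]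
        have ha : aScan mask ((w, p) :: tl) used "" =
            (w :: (aScan mask tl used "").1, (aScan mask tl used "").2) := by
          simp [aScan, hu]
        constructor
        · intro h
          rw [hb] at h
          simp [ha, (ih used (n + 1)).1 h]
        · intro q t h
          rw [hb] at h
          obtain ⟨hnq, w', hA, hB⟩ := (ih used (n + 1)).2 q t h
          refine ⟨by omega, w', ?_, ?_⟩
          · rw [ha, hA]
            have hq : q - n = (q - (n + 1)) + 1 := by omega
            simp [hq]
          · have hb' : bScan mask ((w, p) :: tl) (used ++ [w']) n =
                bScan mask tl (used ++ [w']) (n + 1) := by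
              simp [bScan, PySem.Set.contains, hu]
            rw [hb', hB]
      · -- fresh maskable word: this is the masked position
        have hb : bScan mask ((w, p) :: tl) used n =
            n :: bScan mask tl (used ++ [w]) (n + 1) := by
          simp [bScan, PySem.Set.contains, hm, hu]
        have ha : aScan mask ((w, p) :: tl) used "" =
            ("[MASK]" :: (tl.map Prod.fst), used ++ [w]) := by
          simp [aScan, hm, hu, aScan_flg]
        constructor
        · intro h; rw [hb] at h; exact absurd h (by simp)
        · intro q t h
          rw [hb] at h
          injection h with h1 h2
          subst h1
          refine ⟨le_refl n, w, by simp [ha], ?_⟩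
          have hb' : bScan mask ((w, p) :: tl) (used ++ [w]) n =
              bScan mask tl (used ++ [w]) (n + 1) := by
            simp [bScan, PySem.Set.contains]
          rw [hb', h2]
    · -- pos not maskable: both scans skip this pair
      have hb : ∀ u : List String, bScan mask ((w, p) :: tl) u n = bScan mask tl u (n + 1) := by
        intro u; simp [bScan, hm]
      have ha : aScan mask ((w, p) :: tl) used "" =
          (w :: (aScan mask tl used "").1, (aScan mask tl used "").2) := by
        simp [aScan, hm]
      constructor
      · intro h
        rw [hb] at h
        simp [ha, (ih used (n + 1)).1 h]
      · intro q t h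
        rw [hb] at h
        obtain ⟨hnq, w', hA, hB⟩ := (ih used (n + 1)).2 q t h
        refine ⟨by omega, w', ?_, ?_⟩
        · rw [ha, hA]
          have hq : q - n = (q - (n + 1)) + 1 := by omega
          simp [hq]
        · rw [hb, hB]

-- proof-only generator: the sentences produced from a position list
def gen (base : List String) : List Nat → Nat → List String
  | _, 0 => []
  | [], k + 1 => PySem.Str.join " " base :: gen base [] k
  | q :: t, k + 1 => PySem.Str.join " " (base.set q "[MASK]") :: gen base t k

lemma aLoop_eq_gen (mask : List String) (pairs : List (String × String)) :
    ∀ (k : Nat) (used : List String),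
      aLoop mask pairs k used = gen (pairs.map Prod.fst) (bScan mask pairs used 0) k := by
  intro k
  induction k with
  | zero => intro used; cases bScan mask pairs used 0 <;> rfl
  | succ k ih =>
    intro used
    cases h : bScan mask pairs used 0 with
    | nil =>
      have hA := (step mask pairs used 0).1 h
      simp only [aLoop, hA, gen, ih used, h]
    | cons q t =>
      obtain ⟨-, w, hA, hB⟩ := (step mask pairs used 0).2 q t h
      simp only [Nat.sub_zero] at hA
      simp only [aLoop, hA, gen, ih (used ++ [w]), hB]

lemma gen_eq_map (base : List String) : ∀ (k : Nat) (ps : List Nat),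
    gen base ps k = (List.range k).map (fun i =>
      if h : i < ps.length then PySem.Str.join " " (base.set ps[i] "[MASK]")
      else PySem.Str.join " " base) := by
  intro k
  induction k with
  | zero => intro ps; cases ps <;> rfl
  | succ k ih =>
    intro ps
    rw [List.range_succ_eq_map]
    cases ps with
    | nil =>
      simp [gen, ih, Function.comp_def]
    | cons q t =>
      simp only [gen, ih, List.map_cons, List.map_map]
      congr 1
      apply List.map_congr_left
      intro i _
      by_cases hi : i < t.length
      · simp [Function.comp, hi, Nat.succ_lt_succ hi]
      · have h2 : ¬ (i + 1 < (q :: t).length) := by simp; omega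
        simp [Function.comp, hi]

-- ===== VERDICT (by name: the statement is the Claim_ definition above) =====
theorem mask_sentence_spec : Claim_equal_mask_sentence := by
  intro words_lst word_pos_tags mask_pos_list _ _
  unfold Spec_mask_sentence mask_sentence mask_sentence_alt
  rw [aLoop_eq_gen, gen_eq_map]
  rfl
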